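-- pv_equiv track=rewrite | github.com/mint412/practice-repo | data analysis and visualisation with python.py | merge_and_find_unique
-- ===== SOURCE A (Python) =====
-- def merge_and_find_unique(list1, list2, list3):
--     # Merge the three lists into a single list
--     merged_list = list1 + list2 + list3
--
--     # Sort the merged list
--     sorted_list = sorted(merged_list)
--
--     # Find unique elements in the sorted list
--     unique_elements = []
--     for item in sorted_list:
--         if sorted_list.count(item) == 1:
--             unique_elements.append(item)
--
--     return unique_elements
-- ===== SOURCE B (Python) =====
-- def merge_and_find_unique(list1, list2, list3):
--     # Single linear pass over the sorted merge: keep keys whose run has length 1.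
--     s = sorted(list1 + list2 + list3)
--     result = []
--     i, n = 0, len(s)
--     while i < n:
--         j = i + 1
--         while j < n and s[j] == s[i]:
--             j += 1
--         if j == i + 1:
--             result.append(s[i])
--         i = j
--     return result
-- ===== Notes on version B (the rewrite author's own statement) =====
-- stated objective: faster
-- what changed: Replaces the per-element count() re-scan of the whole sorted list with a single adjacent-run pass over the sorted list that keeps keys whose run has length 1.
import Mathlib
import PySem

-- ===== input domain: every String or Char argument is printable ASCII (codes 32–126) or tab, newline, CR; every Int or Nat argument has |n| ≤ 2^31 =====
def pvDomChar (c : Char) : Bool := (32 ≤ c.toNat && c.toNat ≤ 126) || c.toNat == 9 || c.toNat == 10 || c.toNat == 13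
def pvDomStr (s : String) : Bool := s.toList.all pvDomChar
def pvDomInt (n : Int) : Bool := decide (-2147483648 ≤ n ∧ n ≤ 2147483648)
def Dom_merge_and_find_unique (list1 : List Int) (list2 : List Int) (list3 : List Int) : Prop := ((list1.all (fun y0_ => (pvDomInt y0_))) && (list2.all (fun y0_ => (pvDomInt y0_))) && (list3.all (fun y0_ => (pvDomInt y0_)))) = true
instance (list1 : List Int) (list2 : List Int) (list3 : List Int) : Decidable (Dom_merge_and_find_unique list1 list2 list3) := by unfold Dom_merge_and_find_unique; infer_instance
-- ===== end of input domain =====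

-- B replaces A's per-element whole-list count() re-scan with one adjacent-run pass over the sorted merge (faster).

-- ===== PORT A =====
def merge_and_find_unique (list1 : List Int) (list2 : List Int) (list3 : List Int) : List Int :=
  let merged_list := list1 ++ list2 ++ list3
  let sorted_list := PySem.List.sorted merged_list (fun x => x) false
  sorted_list.foldl (fun acc item => if sorted_list.count item = 1 then acc ++ [item] else acc) []

-- ===== PORT B =====
-- the run scan: advance over the run of elements equal to the head; keep the head iff the run beyond it is empty
def pvRunScan : List Int → List Int
  | [] => []
  | x :: xs =>
    let run := xs.takeWhile (· == x)
    let rest := xs.dropWhile (· == x)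
    if run.isEmpty then x :: pvRunScan rest else pvRunScan rest
  termination_by s => s.length
  decreasing_by all_goals (simp only [List.length_cons]; exact Nat.lt_succ_of_le (List.length_dropWhile_le _ _))

def merge_and_find_unique_alt (list1 : List Int) (list2 : List Int) (list3 : List Int) : List Int :=
  let s := PySem.List.sorted (list1 ++ list2 ++ list3) (fun x => x) false
  pvRunScan s

-- ===== PRECONDITION & SPEC =====
def Spec_merge_and_find_unique (list1 : List Int) (list2 : List Int) (list3 : List Int) (out : List Int) : Prop := out = merge_and_find_unique_alt list1 list2 list3
instance (list1 : List Int) (list2 : List Int) (list3 : List Int) (out : List Int) : Decidable (Spec_merge_and_find_unique list1 list2 list3 out) := by unfold Spec_merge_and_find_unique; infer_instance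

-- ===== CLAIM (what is proved, stated in full; the proofs are below) =====
def Claim_equal_merge_and_find_unique : Prop := ∀ (list1 : List Int) (list2 : List Int) (list3 : List Int), Dom_merge_and_find_unique list1 list2 list3 → Spec_merge_and_find_unique list1 list2 list3 (merge_and_find_unique list1 list2 list3)

-- ===== LEMMAS AND PROOFS =====

-- on a sorted list, the "global count = 1" filter equals the adjacent-run scan
theorem filter_count_one_eq_runScan : ∀ (n : Nat) (s : List Int), s.length ≤ n →
    s.Pairwise (· ≤ ·) →
    s.filter (fun x => decide (s.count x = 1)) = pvRunScan s := by
  intro n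
  induction n with
  | zero =>
    intro s hlen _
    have : s = [] := List.eq_nil_of_length_eq_zero (Nat.le_zero.mp hlen)
    subst this; unfold pvRunScan; rfl
  | succ n ih =>
    intro s hlen hsorted
    match s with
    | [] => unfold pvRunScan; rfl
    | x :: xs =>
      obtain ⟨run, rest, hrun, hrest⟩ :
          ∃ run rest, run = xs.takeWhile (· == x) ∧ rest = xs.dropWhile (· == x) :=
        ⟨_, _, rfl, rfl⟩
      have hsplit : run ++ rest = xs := by
        rw [hrun, hrest]; exact List.takeWhile_append_dropWhile
      -- every element of run equals x
      have hrun_eq : ∀ y ∈ run, y = x := by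
        intro y hy
        rw [hrun] at hy
        have := List.mem_takeWhile_imp hy
        simpa using this
      -- every element of xs is ≥ x; rest is sorted
      have hge : ∀ y ∈ xs, x ≤ y := (List.pairwise_cons.mp hsorted).1
      have hxs_sorted : xs.Pairwise (· ≤ ·) := (List.pairwise_cons.mp hsorted).2
      have hrest_sorted : rest.Pairwise (· ≤ ·) := by
        have : rest.Sublist xs := by rw [hrest]; exact List.dropWhile_sublist _
        exact hxs_sorted.sublist this
      -- x does not occur in rest, hence every element of rest is > x
      have hx_notin_rest : x ∉ rest := by
        intro hx
        have hne : ∀ r0 rtl, rest = r0 :: rtl → False := by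
          intro r0 rtl hR
          have hr0ne : ¬ (r0 == x) = true := by
            have h := List.head?_dropWhile_not (p := (· == x)) (l := xs)
            rw [← hrest, hR] at h
            simpa using h
          have hr0mem : r0 ∈ xs := by
            have h1 : r0 ∈ rest := by rw [hR]; exact List.mem_cons_self
            rw [hrest] at h1
            exact (List.dropWhile_sublist _).subset h1
          have h1 : x ≤ r0 := hge r0 hr0mem
          have h2 : r0 ≤ x := by
            rw [hR] at hx hrest_sorted
            rcases List.mem_cons.mp hx with h | h
            · exact le_of_eq h.symm
            · exact (List.pairwise_cons.mp hrest_sorted).1 x h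
          exact hr0ne (by simp [le_antisymm h2 h1])
        cases rest with
        | nil => simp at hx
        | cons a l => exact hne a l rfl
      have hgt : ∀ y ∈ rest, x < y := by
        intro y hy
        have hymem : y ∈ xs := by
          rw [hrest] at hy
          exact (List.dropWhile_sublist _).subset hy
        rcases lt_or_eq_of_le (hge y hymem) with h | h
        · exact h
        · subst h; exact absurd hy hx_notin_rest
      -- count of x in the whole list
      have hcount_rest_x : rest.count x = 0 := List.count_eq_zero.mpr hx_notin_rest
      have hcount_run_x : run.count x = run.length := by
        apply List.count_eq_length.mpr
        intro y hy; exact (hrun_eq y hy).symm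
      have hcount_x : (x :: xs).count x = 1 + run.length := by
        rw [← hsplit]
        simp [List.count_append, hcount_rest_x, hcount_run_x]
        omega
      -- count of any y ∈ rest in the whole list is its count in rest
      have hcount_rest : ∀ y ∈ rest, (x :: xs).count y = rest.count y := by
        intro y hy
        have hyne : y ≠ x := fun h => lt_irrefl x (h ▸ hgt y hy)
        have hrun_y : run.count y = 0 := by
          apply List.count_eq_zero.mpr
          intro h; exact hyne (hrun_eq y h)
        rw [← hsplit]
        simp [List.count_append, hrun_y, Ne.symm hyne]
      have hlen' : rest.length ≤ n := by
        have h1 : rest.length ≤ xs.length := by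
          rw [hrest]; exact List.length_dropWhile_le _ _
        simp at hlen; omega
      have hIH : rest.filter (fun y => decide (rest.count y = 1)) = pvRunScan rest :=
        ih rest hlen' hrest_sorted
      have hscan : pvRunScan (x :: xs) =
          if run.isEmpty then x :: pvRunScan rest else pvRunScan rest := by
        rw [pvRunScan.eq_def]
        simp only [← hrun, ← hrest]
      by_cases hempty : run = []
      · -- unique head: count x = 1
        have hxc : (x :: xs).count x = 1 := by rw [hcount_x, hempty]; rfl
        have hxs_eq : xs = rest := by rw [← hsplit, hempty]; rfl
        rw [hscan, if_pos (by simp [hempty])]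
        rw [List.filter_cons]
        rw [if_pos (by simp [hxc])]
        congr 1
        rw [← hIH]
        have hfc : xs.filter (fun y => decide ((x :: xs).count y = 1)) =
            xs.filter (fun y => decide (rest.count y = 1)) := by
          apply List.filter_congr
          intro y hy
          rw [hcount_rest y (hxs_eq ▸ hy)]
        rw [hfc, hxs_eq]
      · -- repeated head: count x ≥ 2, the head and the whole run are dropped
        have hxc : ¬ (x :: xs).count x = 1 := by
          rw [hcount_x]
          have : run.length ≠ 0 := fun h => hempty (List.eq_nil_of_length_eq_zero h)
          omega
        rw [hscan, if_neg (by simpa [List.isEmpty_iff] using hempty)]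
        rw [List.filter_cons]
        rw [if_neg (by simpa using hxc)]
        have hfa : xs.filter (fun y => decide ((x :: xs).count y = 1)) =
            run.filter (fun y => decide ((x :: xs).count y = 1)) ++
              rest.filter (fun y => decide ((x :: xs).count y = 1)) := by
          rw [← List.filter_append, hsplit]
        rw [hfa]
        have hfrun : run.filter (fun y => decide ((x :: xs).count y = 1)) = [] := by
          apply List.filter_eq_nil_iff.mpr
          intro y hy
          rw [hrun_eq y hy]
          simpa using hxc
        rw [hfrun, List.nil_append, ← hIH]
        apply List.filter_congr
        intro y hy
        rw [hcount_rest y hy]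

-- ===== VERDICT (by name: the statement is the Claim_ definition above) =====
theorem merge_and_find_unique_spec : Claim_equal_merge_and_find_unique := by
  intro list1 list2 list3 _
  unfold Spec_merge_and_find_unique merge_and_find_unique merge_and_find_unique_alt
  simp only []
  set s := PySem.List.sorted (list1 ++ list2 ++ list3) (fun x => x) false with hs
  have hsorted : s.Pairwise (· ≤ ·) := by
    rw [hs]
    exact PySem.List.sorted_pairwise (xs := list1 ++ list2 ++ list3) (key := fun x : Int => x)
  have h1 : s.foldl (fun acc item => if s.count item = 1 then acc ++ [item] else acc) [] =
      s.filter (fun x => decide (s.count x = 1)) := by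
    have := PySem.List.foldl_append_ite_eq_filter (l := s) (acc := ([] : List Int))
      (p := fun x => s.count x = 1)
    simpa using this
  rw [h1, filter_count_one_eq_runScan s.length s le_rfl hsorted]
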